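-- pv_equiv track=rewrite | github.com/jasveen18/CP-krle-placement-lag-jayegi | AlgoExpert/07 Dynamic Programming/12 valentineMagic.py | valentineMagic
-- ===== SOURCE A (Python) =====
-- def valentineMagic(chocolates: list, candies: list, dp: list, i, j):
--     """Return the min number of absolute difference elements of one array to second array.
--     The size of arrays are different.
--     O(N*N) time | O(N*N) space"""
--     # If we matched all boys
--     if i == len(chocolates):
--         return 0
--
--     # If no girls are there, reject this answer
--     if j == len(candies):
--         return 99999999
--
--     # Look up table
--     if dp[i][j] != -1:
--         return dp[i][j]
--
--     # Recursive Case
--     takeGirl = abs(chocolates[i] - candies[j]) + \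
--         valentineMagic(chocolates, candies, dp, i+1, j+1)
--     dontTakeGirl = valentineMagic(chocolates, candies, dp, i, j+1)
--
--     dp[i][j] = min(takeGirl, dontTakeGirl)
--     return dp[i][j]
-- ===== SOURCE B (Python) =====
-- def _memo(dp, x, jj):
--     """Memoized value at (x, jj), or -1 if the table has no such cell."""
--     if 0 <= x < len(dp):
--         row = dp[x]
--         if 0 <= jj < len(row):
--             return row[jj]
--     return -1
--
--
-- def _row(chocolates, candies, dp, x, below):
--     """Row x of the value table, built right-to-left from the row below it,
--     honouring memoized (!= -1) entries of dp."""
--     row = [99999999]               # column m: no girls left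
--     for jj in range(len(candies) - 1, -1, -1):
--         memo = _memo(dp, x, jj)
--         if memo != -1:
--             v = memo
--         else:
--             v = min(abs(chocolates[x] - candies[jj]) + below[jj + 1], row[0])
--         row = [v] + row
--     return row
--
--
-- def valentineMagic(chocolates: list, candies: list, dp: list, i, j):
--     """Bottom-up DP: build the rows of the value table from row len(chocolates)
--     upwards; returns the same value as the memoized recursion but does not
--     mutate dp."""
--     n, m = len(chocolates), len(candies)
--     if i == n:
--         return 0
--     if j == m:
--         return 99999999
--     below = [0] * (m + 1)          # row n: all boys matched
--     rows = [below]
--     for x in range(n - 1, -1, -1):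
--         row = _row(chocolates, candies, dp, x, below)
--         rows = [row] + rows
--         below = row
--     return rows[i][j]
-- ===== Notes on version B (the rewrite author's own statement) =====
-- stated objective: alternative
-- what changed: Replaces the top-down memoized recursion that lazily mutates dp with an iterative bottom-up fill that builds the whole value table row by row (back to front), treating absent or -1 dp cells as unmemoized, and indexes the finished table; B does not mutate dp (return-value equivalence only).
-- outside the precondition, e.g. on valentineMagic([1], [3, 4, 9], [[-1, 5]], 0, 0): A returns 2, B returns 2; on valentineMagic([3], [5], [[7]], -1, 0): A returns 7, B returns 0
import Mathlib
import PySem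

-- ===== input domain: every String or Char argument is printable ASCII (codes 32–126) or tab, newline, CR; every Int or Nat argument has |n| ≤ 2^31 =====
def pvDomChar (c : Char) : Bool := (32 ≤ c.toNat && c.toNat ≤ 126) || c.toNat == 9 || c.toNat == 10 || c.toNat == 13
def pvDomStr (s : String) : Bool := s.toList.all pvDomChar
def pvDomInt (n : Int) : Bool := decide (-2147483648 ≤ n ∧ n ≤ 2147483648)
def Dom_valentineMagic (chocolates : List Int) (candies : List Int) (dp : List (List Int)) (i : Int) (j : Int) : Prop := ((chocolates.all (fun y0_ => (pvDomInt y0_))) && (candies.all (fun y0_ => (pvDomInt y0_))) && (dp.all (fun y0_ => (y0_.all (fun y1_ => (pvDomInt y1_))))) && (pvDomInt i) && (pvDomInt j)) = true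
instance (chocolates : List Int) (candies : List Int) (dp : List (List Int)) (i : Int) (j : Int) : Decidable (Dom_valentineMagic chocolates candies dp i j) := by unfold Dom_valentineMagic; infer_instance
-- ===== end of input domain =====

-- B replaces A's top-down memoized recursion (which lazily mutates dp) by an iterative
-- bottom-up fill of the whole value table, built row by row from the back, treating dp
-- cells that are absent or -1 as unmemoized.  A mutates dp in place, B does not: the
-- equivalence proved here is about the RETURN value only.

-- shared Python-indexing helpers (xs[k] with a default; the default is unreachable under Pre_)
def pvGetI (xs : List Int) (k : Int) : Int := (PySem.List.pyGet? xs k).getD 0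
def pvGetRow (d : List (List Int)) (k : Int) : List Int := (PySem.List.pyGet? d k).getD []
def pvMat (d : List (List Int)) (x y : Int) : Int := pvGetI (pvGetRow d x) y

-- ===== PORT A =====
-- dp[i][j] = v  (indices nonnegative and in range under Pre_)
def pvSetMat (d : List (List Int)) (x y : Int) (v : Int) : List (List Int) :=
  d.set x.toNat ((pvGetRow d x).set y.toNat v)

-- A's memoized recursion with dp threaded as state; fuel is only a totality guard
-- (every recursive call increases j by 1, so candies.length + 1 steps always suffice under Pre_).
def vmAux (ch ca : List Int) : Nat → List (List Int) → Int → Int → Int × List (List Int)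
  | 0, d, _, _ => (0, d)
  | fuel + 1, d, i, j =>
    if i = (ch.length : Int) then (0, d)
    else if j = (ca.length : Int) then (99999999, d)
    else if pvMat d i j ≠ -1 then (pvMat d i j, d)
    else
      let r1 := vmAux ch ca fuel d (i + 1) (j + 1)
      let take := |pvGetI ch i - pvGetI ca j| + r1.1
      let r2 := vmAux ch ca fuel r1.2 i (j + 1)
      let v := min take r2.1
      (v, pvSetMat r2.2 i j v)

def valentineMagic (chocolates : List Int) (candies : List Int) (dp : List (List Int)) (i : Int) (j : Int) : Int :=
  (vmAux chocolates candies (candies.length + 1) dp i j).1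

-- ===== PORT B =====
-- port of Source B's _memo: the memoized value at (x, jj), or -1 if dp has no such cell
def pvMemo (d : List (List Int)) (x y : Int) : Int :=
  if 0 ≤ x ∧ x < (d.length : Int) then
    let row := pvGetRow d x
    if 0 ≤ y ∧ y < (row.length : Int) then pvGetI row y else -1
  else -1

-- port of Source B's _row: one table row, built right-to-left from the row below it
def vmRowB (chocolates candies : List Int) (dp : List (List Int)) (x : Int) (below : List Int) : List Int :=
  (PySem.List.pyRange ((candies.length : Int) - 1) (-1) (-1)).foldl
    (fun (row : List Int) jj =>
      (if pvMemo dp x jj ≠ -1 then pvMemo dp x jj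
       else min (|pvGetI chocolates x - pvGetI candies jj| + pvGetI below (jj + 1))
                (pvGetI row 0)) :: row)
    [99999999]

def valentineMagic_alt (chocolates : List Int) (candies : List Int) (dp : List (List Int)) (i : Int) (j : Int) : Int :=
  if i = (chocolates.length : Int) then 0
  else if j = (candies.length : Int) then 99999999
  else
  let n : Int := chocolates.length
  let m : Nat := candies.length
  let below0 : List Int := List.replicate (m + 1) 0
  let fin := (PySem.List.pyRange (n - 1) (-1) (-1)).foldl
    (fun (st : List (List Int) × List Int) x =>
      let row := vmRowB chocolates candies dp x st.2
      (row :: st.1, row))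
    ([below0], below0)
  pvGetI (pvGetRow fin.1 i) j

-- ===== PRECONDITION & SPEC =====
-- Pre_ excludes (a) inputs where A raises — some cell in the triangular region the recursion
-- may read lies outside dp (the shape clause below is the closed-form sufficient condition;
-- smaller dp tables on which A escapes the out-of-range read through a memo hit are
-- conservatively excluded too, and A and B AGREE there, see the cites) — and (b) i or j
-- outside [0, len], where A's returned value comes from Python's negative-index wraparound
-- or from reading memo rows past the arrays, an accident of A's indexing that B does not mimic.
def Pre_valentineMagic (chocolates : List Int) (candies : List Int) (dp : List (List Int)) (i : Int) (j : Int) : Prop :=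
  i = chocolates.length ∨ (i ≠ chocolates.length ∧ j = candies.length) ∨
  (0 ≤ i ∧ i < chocolates.length ∧ 0 ≤ j ∧ j < candies.length ∧
   ∀ x : Nat, x < chocolates.length → i.toNat ≤ x →
     x < dp.length ∧ ∀ y : Nat, y < candies.length → j.toNat + (x - i.toNat) ≤ y →
       y < (dp[x]?.getD []).length)
instance (chocolates : List Int) (candies : List Int) (dp : List (List Int)) (i : Int) (j : Int) : Decidable (Pre_valentineMagic chocolates candies dp i j) := by unfold Pre_valentineMagic; infer_instance

def pvWitness_valentineMagic : List Int × List Int × List (List Int) × Int × Int :=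
  ([1, 4], [2, 5, 7], [[-1, -1, -1], [-1, 6, -1]], 0, 0)

def Spec_valentineMagic (chocolates : List Int) (candies : List Int) (dp : List (List Int)) (i : Int) (j : Int) (out : Int) : Prop := out = valentineMagic_alt chocolates candies dp i j
instance (chocolates : List Int) (candies : List Int) (dp : List (List Int)) (i : Int) (j : Int) (out : Int) : Decidable (Spec_valentineMagic chocolates candies dp i j out) := by unfold Spec_valentineMagic; infer_instance

-- ===== CLAIM (what is proved, stated in full; the proofs are below) =====
def Claim_equal_valentineMagic : Prop := ∀ (chocolates : List Int) (candies : List Int) (dp : List (List Int)) (i : Int) (j : Int), Dom_valentineMagic chocolates candies dp i j → Pre_valentineMagic chocolates candies dp i j → Spec_valentineMagic chocolates candies dp i j (valentineMagic chocolates candies dp i j)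

-- ===== LEMMAS AND PROOFS =====

-- the pure value A computes: the memo recurrence read off the ORIGINAL dp (raw reads)
def pvVal (ch ca : List Int) (dp0 : List (List Int)) (i j : Nat) : Int :=
  if i = ch.length then 0
  else if _h : ca.length ≤ j then 99999999
  else if pvMat dp0 (i : Int) (j : Int) ≠ -1 then pvMat dp0 (i : Int) (j : Int)
  else min (|pvGetI ch (i : Int) - pvGetI ca (j : Int)| + pvVal ch ca dp0 (i + 1) (j + 1))
           (pvVal ch ca dp0 i (j + 1))
termination_by ca.length - j
decreasing_by all_goals omega

-- the pure value B computes: the same recurrence with bounds-checked memo reads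
def pvValB (ch ca : List Int) (dp0 : List (List Int)) (i j : Nat) : Int :=
  if i = ch.length then 0
  else if _h : ca.length ≤ j then 99999999
  else if pvMemo dp0 (i : Int) (j : Int) ≠ -1 then pvMemo dp0 (i : Int) (j : Int)
  else min (|pvGetI ch (i : Int) - pvGetI ca (j : Int)| + pvValB ch ca dp0 (i + 1) (j + 1))
           (pvValB ch ca dp0 i (j + 1))
termination_by ca.length - j
decreasing_by all_goals omega

-- dp states reachable by A's recursion: every in-range cell is either untouched or memoized
def pvCons (ch ca : List Int) (dp0 d : List (List Int)) : Prop :=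
  ∀ x y : Nat, x < ch.length → y < ca.length →
    pvMat d (x : Int) (y : Int) = pvMat dp0 (x : Int) (y : Int) ∨
    pvMat d (x : Int) (y : Int) = pvVal ch ca dp0 x y

theorem pvGetI_nat (xs : List Int) (k : Nat) : pvGetI xs (k : Int) = xs[k]?.getD 0 := by
  simp [pvGetI]

theorem pvGetRow_nat (d : List (List Int)) (k : Nat) : pvGetRow d (k : Int) = d[k]?.getD [] := by
  simp [pvGetRow]

theorem pvMat_nat (d : List (List Int)) (x y : Nat) :
    pvMat d (x : Int) (y : Int) = (d[x]?.getD [])[y]?.getD 0 := by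
  simp [pvMat, pvGetRow_nat, pvGetI_nat]

theorem pvMemo_eq_pvMat (d : List (List Int)) (x y : Nat)
    (hx : x < d.length) (hy : y < (d[x]?.getD []).length) :
    pvMemo d (x : Int) (y : Int) = pvMat d (x : Int) (y : Int) := by
  unfold pvMemo
  rw [if_pos ⟨Int.natCast_nonneg x, by exact_mod_cast hx⟩]
  rw [pvGetRow_nat]
  rw [if_pos ⟨Int.natCast_nonneg y, by exact_mod_cast hy⟩]
  rw [pvGetI_nat, pvMat_nat]

theorem pvMat_set_self (d : List (List Int)) (x y : Nat) (v : Int)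
    (hx : x < d.length) (hy : y < (d[x]?.getD []).length) :
    pvMat (pvSetMat d (x : Int) (y : Int) v) (x : Int) (y : Int) = v := by
  have hy' : y < d[x].length := by simpa [List.getElem?_eq_getElem hx] using hy
  simp [pvSetMat, pvMat_nat, pvGetRow_nat, List.getElem?_set_self', hx]
  rw [List.getElem?_eq_getElem hy']
  simp

theorem pvMat_set_other (d : List (List Int)) (x y a b : Nat) (v : Int)
    (h : a ≠ x ∨ b ≠ y) :
    pvMat (pvSetMat d (x : Int) (y : Int) v) (a : Int) (b : Int) = pvMat d (a : Int) (b : Int) := by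
  rcases h with h | h
  · simp [pvSetMat, pvMat_nat, pvGetRow_nat, List.getElem?_set_ne (by omega : x ≠ a)]
  · simp only [pvSetMat, pvMat_nat, pvGetRow_nat, Int.toNat_natCast]
    by_cases hax : a = x
    · subst hax
      by_cases hlt : a < d.length
      · rw [List.getElem?_set_self hlt]
        simp [List.getElem?_set_ne (by omega : y ≠ b), List.getElem?_eq_getElem hlt]
      · rw [List.set_eq_of_length_le (by omega)]
    · rw [List.getElem?_set_ne (by omega : x ≠ a)]

-- setting a cell outside dp's shape is a no-op (Python would have raised; unreachable under Pre_)
theorem pvSetMat_noop (d : List (List Int)) (x y : Nat) (v : Int)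
    (h : ¬ (x < d.length ∧ y < (d[x]?.getD []).length)) :
    pvSetMat d (x : Int) (y : Int) v = d := by
  unfold pvSetMat
  rw [Int.toNat_natCast, Int.toNat_natCast]
  by_cases hx : x < d.length
  · have hy : (d[x]?.getD []).length ≤ y := by
      rcases not_and_or.mp h with h' | h'
      · omega
      · omega
    rw [pvGetRow_nat, List.set_eq_of_length_le hy]
    have : d[x]?.getD [] = d[x] := by rw [List.getElem?_eq_getElem hx]; rfl
    rw [this, List.set_getElem_self hx]
  · exact List.set_eq_of_length_le (by omega)

theorem pvVal_i_eq (ch ca : List Int) (dp0 : List (List Int)) (j : Nat) :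
    pvVal ch ca dp0 ch.length j = 0 := by
  rw [pvVal]; simp

theorem pvVal_j_eq (ch ca : List Int) (dp0 : List (List Int)) (i : Nat) (hi : i ≠ ch.length) :
    pvVal ch ca dp0 i ca.length = 99999999 := by
  rw [pvVal, if_neg hi, dif_pos le_rfl]

theorem pvVal_memo (ch ca : List Int) (dp0 : List (List Int)) (x y : Nat)
    (hx : x < ch.length) (hy : y < ca.length) (h0 : pvMat dp0 (x : Int) (y : Int) ≠ -1) :
    pvVal ch ca dp0 x y = pvMat dp0 (x : Int) (y : Int) := by
  rw [pvVal, if_neg (by omega), dif_neg (by omega), if_pos h0]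

theorem pvVal_rec (ch ca : List Int) (dp0 : List (List Int)) (x y : Nat)
    (hx : x < ch.length) (hy : y < ca.length) (h0 : pvMat dp0 (x : Int) (y : Int) = -1) :
    pvVal ch ca dp0 x y =
      min (|pvGetI ch (x : Int) - pvGetI ca (y : Int)| + pvVal ch ca dp0 (x + 1) (y + 1))
          (pvVal ch ca dp0 x (y + 1)) := by
  rw [pvVal, if_neg (by omega), dif_neg (by omega), if_neg (by simp [h0])]

theorem pvValB_i_eq (ch ca : List Int) (dp0 : List (List Int)) (j : Nat) :
    pvValB ch ca dp0 ch.length j = 0 := by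
  rw [pvValB]; simp

theorem pvValB_j_eq (ch ca : List Int) (dp0 : List (List Int)) (i : Nat) (hi : i ≠ ch.length) :
    pvValB ch ca dp0 i ca.length = 99999999 := by
  rw [pvValB, if_neg hi, dif_pos le_rfl]

theorem pvValB_memo (ch ca : List Int) (dp0 : List (List Int)) (x y : Nat)
    (hx : x < ch.length) (hy : y < ca.length) (h0 : pvMemo dp0 (x : Int) (y : Int) ≠ -1) :
    pvValB ch ca dp0 x y = pvMemo dp0 (x : Int) (y : Int) := by
  rw [pvValB, if_neg (by omega), dif_neg (by omega), if_pos h0]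

theorem pvValB_rec (ch ca : List Int) (dp0 : List (List Int)) (x y : Nat)
    (hx : x < ch.length) (hy : y < ca.length) (h0 : pvMemo dp0 (x : Int) (y : Int) = -1) :
    pvValB ch ca dp0 x y =
      min (|pvGetI ch (x : Int) - pvGetI ca (y : Int)| + pvValB ch ca dp0 (x + 1) (y + 1))
          (pvValB ch ca dp0 x (y + 1)) := by
  rw [pvValB, if_neg (by omega), dif_neg (by omega), if_neg (by simp [h0])]

-- when the whole triangle reachable from (i, j) is inside dp's shape, raw and
-- bounds-checked memo reads coincide on every cell the recurrence touches
theorem pvVal_eq_pvValB (ch ca : List Int) (dp0 : List (List Int)) :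
    ∀ k i j : Nat, ca.length - j ≤ k → i ≤ ch.length →
      (∀ x : Nat, x < ch.length → i ≤ x →
        x < dp0.length ∧ ∀ y : Nat, y < ca.length → j + (x - i) ≤ y →
          y < (dp0[x]?.getD []).length) →
      pvVal ch ca dp0 i j = pvValB ch ca dp0 i j := by
  intro k
  induction k with
  | zero =>
    intro i j hk hi _
    by_cases hieq : i = ch.length
    · rw [hieq, pvVal_i_eq, pvValB_i_eq]
    · have hj : ca.length ≤ j := by omega
      rw [pvVal, if_neg hieq, dif_pos hj, pvValB, if_neg hieq, dif_pos hj]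
  | succ k ih =>
    intro i j hk hi htri
    by_cases hieq : i = ch.length
    · rw [hieq, pvVal_i_eq, pvValB_i_eq]
    · by_cases hj : ca.length ≤ j
      · rw [pvVal, if_neg hieq, dif_pos hj, pvValB, if_neg hieq, dif_pos hj]
      · have hilt : i < ch.length := by omega
        have hjlt : j < ca.length := by omega
        have hcell := htri i hilt le_rfl
        have hread : pvMemo dp0 (i : Int) (j : Int) = pvMat dp0 (i : Int) (j : Int) :=
          pvMemo_eq_pvMat dp0 i j hcell.1 (hcell.2 j hjlt (by omega))
        by_cases hm : pvMat dp0 (i : Int) (j : Int) = -1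
        · rw [pvVal_rec ch ca dp0 i j hilt hjlt hm,
              pvValB_rec ch ca dp0 i j hilt hjlt (by rw [hread]; exact hm)]
          have h1 := ih (i + 1) (j + 1) (by omega) (by omega) (by
            intro x hx hix
            refine ⟨(htri x hx (by omega)).1, ?_⟩
            intro y hy hxy
            exact (htri x hx (by omega)).2 y hy (by omega))
          have h2 := ih i (j + 1) (by omega) (by omega) (by
            intro x hx hix
            refine ⟨(htri x hx hix).1, ?_⟩
            intro y hy hxy
            exact (htri x hx hix).2 y hy (by omega))
          rw [h1, h2]
        · rw [pvVal_memo ch ca dp0 i j hilt hjlt hm,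
              pvValB_memo ch ca dp0 i j hilt hjlt (by rw [hread]; exact hm), hread]

-- when the current cell reads -1 in a consistent state, the pure value is the min-recurrence
theorem pvVal_of_read_neg_one (ch ca : List Int) (dp0 d : List (List Int)) (x y : Nat)
    (hc : pvCons ch ca dp0 d) (hx : x < ch.length) (hy : y < ca.length)
    (hread : pvMat d (x : Int) (y : Int) = -1) :
    pvVal ch ca dp0 x y =
      min (|pvGetI ch (x : Int) - pvGetI ca (y : Int)| + pvVal ch ca dp0 (x + 1) (y + 1))
          (pvVal ch ca dp0 x (y + 1)) := by
  rcases hc x y hx hy with h | h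
  · exact pvVal_rec ch ca dp0 x y hx hy (by rw [← h]; exact hread)
  · have hv : pvVal ch ca dp0 x y = -1 := by rw [← h]; exact hread
    by_cases h0 : pvMat dp0 (x : Int) (y : Int) = -1
    · exact pvVal_rec ch ca dp0 x y hx hy h0
    · exact absurd ((pvVal_memo ch ca dp0 x y hx hy h0).symm.trans hv) h0

-- main invariant lemma for A's stateful recursion (no shape assumption: an out-of-range
-- memoization step is a no-op on the list and the consistency invariant survives either way)
theorem vmAux_pv (ch ca : List Int) (dp0 : List (List Int)) :
    ∀ (fuel : Nat) (d : List (List Int)) (iN jN : Nat),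
      pvCons ch ca dp0 d →
      iN ≤ ch.length → jN ≤ ca.length → ca.length - jN < fuel →
      (vmAux ch ca fuel d (iN : Int) (jN : Int)).1 = pvVal ch ca dp0 iN jN ∧
      pvCons ch ca dp0 (vmAux ch ca fuel d (iN : Int) (jN : Int)).2 := by
  intro fuel
  induction fuel with
  | zero => intro d iN jN _ _ _ hf; omega
  | succ fuel ih =>
    intro d iN jN hc hi hj hf
    by_cases hieq : iN = ch.length
    · simp only [vmAux, if_pos (show (iN : Int) = (ch.length : Int) by exact_mod_cast hieq)]
      exact ⟨by rw [hieq, pvVal_i_eq], hc⟩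
    · have hne1 : ¬ ((iN : Int) = (ch.length : Int)) := by exact_mod_cast hieq
      by_cases hjeq : jN = ca.length
      · simp only [vmAux, if_neg hne1,
          if_pos (show (jN : Int) = (ca.length : Int) by exact_mod_cast hjeq)]
        exact ⟨by rw [hjeq, pvVal_j_eq ch ca dp0 iN hieq], hc⟩
      · have hne2 : ¬ ((jN : Int) = (ca.length : Int)) := by exact_mod_cast hjeq
        have hilt : iN < ch.length := by omega
        have hjlt : jN < ca.length := by omega
        by_cases hm : pvMat d (iN : Int) (jN : Int) = -1
        · -- miss: recurse on both subproblems, then memoize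
          simp only [vmAux, if_neg hne1, if_neg hne2, if_neg (not_not_intro hm)]
          obtain ⟨e1, c1⟩ := ih d (iN + 1) (jN + 1) hc (by omega) (by omega) (by omega)
          push_cast at e1 c1
          obtain ⟨e2, c2⟩ :=
            ih (vmAux ch ca fuel d ((iN : Int) + 1) ((jN : Int) + 1)).2 iN (jN + 1)
              c1 (by omega) (by omega) (by omega)
          push_cast at e2 c2
          rw [e1, e2]
          have hval : min (|pvGetI ch (iN : Int) - pvGetI ca (jN : Int)| +
                pvVal ch ca dp0 (iN + 1) (jN + 1)) (pvVal ch ca dp0 iN (jN + 1)) =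
                pvVal ch ca dp0 iN jN :=
            (pvVal_of_read_neg_one ch ca dp0 d iN jN hc hilt hjlt hm).symm
          rw [hval]
          refine ⟨rfl, ?_⟩
          intro x y hx hy
          set d2 := (vmAux ch ca fuel (vmAux ch ca fuel d ((iN:Int)+1) ((jN:Int)+1)).2 (iN:Int) ((jN:Int)+1)).2 with hd2
          by_cases hself : x = iN ∧ y = jN
          · obtain ⟨rfl, rfl⟩ := hself
            by_cases hin : x < d2.length ∧ y < (d2[x]?.getD []).length
            · right
              rw [pvMat_set_self d2 x y _ hin.1 hin.2]
            · rw [pvSetMat_noop d2 x y _ hin]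
              exact c2 x y hx hy
          · rw [pvMat_set_other d2 iN jN x y _ (by tauto)]
            exact c2 x y hx hy
        · -- memo hit
          simp only [vmAux, if_neg hne1, if_neg hne2, if_pos (show pvMat d (iN:Int) (jN:Int) ≠ -1 from hm)]
          refine ⟨?_, hc⟩
          rcases hc iN jN hilt hjlt with h | h
          · rw [h, pvVal_memo ch ca dp0 iN jN hilt hjlt (by rw [← h]; exact hm)]
          · exact h

-- ---- B side ----

def pvRowFun (ch ca : List Int) (dp0 : List (List Int)) (x : Nat) : List Int :=
  (List.range (ca.length + 1)).map (fun jj => pvValB ch ca dp0 x jj)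

theorem pvRowFun_top (ch ca : List Int) (dp0 : List (List Int)) :
    pvRowFun ch ca dp0 ch.length = List.replicate (ca.length + 1) 0 := by
  have h0 : ∀ jj, pvValB ch ca dp0 ch.length jj = 0 := fun jj => pvValB_i_eq ch ca dp0 jj
  simp [pvRowFun, h0, List.map_const']

theorem vmRowB_fold (ch ca : List Int) (dp0 : List (List Int)) (x : Nat) (hx : x < ch.length) :
    ∀ t : Nat, t ≤ ca.length →
      (PySem.List.pyRange ((t : Int) - 1) (-1) (-1)).foldl
        (fun (row : List Int) jj =>
          (if pvMemo dp0 (x : Int) jj ≠ -1 then pvMemo dp0 (x : Int) jj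
           else min (|pvGetI ch (x : Int) - pvGetI ca jj| +
                      pvGetI (pvRowFun ch ca dp0 (x + 1)) (jj + 1))
                    (pvGetI row 0)) :: row)
        ((List.range' t (ca.length + 1 - t)).map (fun jj => pvValB ch ca dp0 x jj))
      = pvRowFun ch ca dp0 x := by
  intro t
  induction t with
  | zero =>
    intro _
    rw [PySem.List.pyRange_neg_one_eq_nil (by omega)]
    simp [pvRowFun, List.range_eq_range']
  | succ t ih =>
    intro ht
    rw [show ((t + 1 : Nat) : Int) - 1 = (t : Int) by push_cast; ring,
        PySem.List.pyRange_neg_one_cons (by omega), List.foldl_cons]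
    have hsz : ca.length + 1 - (t + 1) = (ca.length - t - 1) + 1 := by omega
    have hacc0 : pvGetI ((List.range' (t + 1) (ca.length + 1 - (t + 1))).map
        (fun jj => pvValB ch ca dp0 x jj)) 0 = pvValB ch ca dp0 x (t + 1) := by
      rw [hsz, List.range'_succ]
      simp [pvGetI]
    have hbelow : pvGetI (pvRowFun ch ca dp0 (x + 1)) ((t : Int) + 1) =
        pvValB ch ca dp0 (x + 1) (t + 1) := by
      unfold pvRowFun
      rw [show (t : Int) + 1 = ((t + 1 : Nat) : Int) by push_cast; ring, pvGetI_nat]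
      simp [List.getElem?_map, List.getElem?_range (show t + 1 < ca.length + 1 by omega)]
    have hstep : (if pvMemo dp0 (x : Int) (t : Int) ≠ -1 then pvMemo dp0 (x : Int) (t : Int)
           else min (|pvGetI ch (x : Int) - pvGetI ca (t : Int)| +
                      pvGetI (pvRowFun ch ca dp0 (x + 1)) ((t : Int) + 1))
                    (pvGetI ((List.range' (t + 1) (ca.length + 1 - (t + 1))).map
                      (fun jj => pvValB ch ca dp0 x jj)) 0)) = pvValB ch ca dp0 x t := by
      rw [hacc0, hbelow]
      by_cases hmm : pvMemo dp0 (x : Int) (t : Int) = -1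
      · rw [if_neg (not_not_intro hmm), (pvValB_rec ch ca dp0 x t hx (by omega) hmm)]
      · rw [if_pos hmm, pvValB_memo ch ca dp0 x t hx (by omega) hmm]
    rw [hstep]
    have hcons : pvValB ch ca dp0 x t :: (List.range' (t + 1) (ca.length + 1 - (t + 1))).map
        (fun jj => pvValB ch ca dp0 x jj) =
        (List.range' t (ca.length + 1 - t)).map (fun jj => pvValB ch ca dp0 x jj) := by
      rw [show ca.length + 1 - (t + 1) = ca.length - t from by omega,
          show ca.length + 1 - t = (ca.length - t) + 1 from by omega,
          List.range'_succ, List.map_cons]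
    rw [hcons]
    exact ih (by omega)

theorem vmRowB_eq (ch ca : List Int) (dp0 : List (List Int)) (x : Nat) (hx : x < ch.length) :
    vmRowB ch ca dp0 (x : Int) (pvRowFun ch ca dp0 (x + 1)) = pvRowFun ch ca dp0 x := by
  unfold vmRowB
  have h := vmRowB_fold ch ca dp0 x hx ca.length le_rfl
  have hinit : (List.range' ca.length (ca.length + 1 - ca.length)).map
      (fun jj => pvValB ch ca dp0 x jj) = [99999999] := by
    rw [show ca.length + 1 - ca.length = 1 by omega]
    simp [List.range'_one, pvValB_j_eq ch ca dp0 x (by omega)]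
  rw [hinit] at h
  exact h

theorem outer_fold (ch ca : List Int) (dp0 : List (List Int)) :
    ∀ t : Nat, t ≤ ch.length →
      (PySem.List.pyRange ((t : Int) - 1) (-1) (-1)).foldl
        (fun (st : List (List Int) × List Int) x =>
          let row := vmRowB ch ca dp0 x st.2
          (row :: st.1, row))
        ((List.range' t (ch.length + 1 - t)).map (fun x => pvRowFun ch ca dp0 x),
          pvRowFun ch ca dp0 t)
      = ((List.range (ch.length + 1)).map (fun x => pvRowFun ch ca dp0 x),
          pvRowFun ch ca dp0 0) := by
  intro t
  induction t with
  | zero =>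
    intro _
    rw [PySem.List.pyRange_neg_one_eq_nil (by omega)]
    simp [List.range_eq_range']
  | succ t ih =>
    intro ht
    rw [show ((t + 1 : Nat) : Int) - 1 = (t : Int) by push_cast; ring,
        PySem.List.pyRange_neg_one_cons (by omega), List.foldl_cons]
    have hrow : vmRowB ch ca dp0 (t : Int) (pvRowFun ch ca dp0 (t + 1)) = pvRowFun ch ca dp0 t :=
      vmRowB_eq ch ca dp0 t (by omega)
    dsimp only
    rw [hrow]
    have hcons : pvRowFun ch ca dp0 t :: (List.range' (t + 1) (ch.length + 1 - (t + 1))).map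
        (fun x => pvRowFun ch ca dp0 x) =
        (List.range' t (ch.length + 1 - t)).map (fun x => pvRowFun ch ca dp0 x) := by
      rw [show ch.length + 1 - (t + 1) = ch.length - t from by omega,
          show ch.length + 1 - t = (ch.length - t) + 1 from by omega,
          List.range'_succ, List.map_cons]
    rw [hcons]
    exact ih (by omega)

theorem alt_eq_pv (ch ca : List Int) (dp0 : List (List Int)) (i j : Int)
    (hi : 0 ≤ i) (hi2 : i < ch.length) (hj : 0 ≤ j) (hj2 : j < ca.length) :
    valentineMagic_alt ch ca dp0 i j = pvValB ch ca dp0 i.toNat j.toNat := by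
  unfold valentineMagic_alt
  rw [if_neg (by omega), if_neg (by omega)]
  have h := outer_fold ch ca dp0 ch.length le_rfl
  have hinit1 : (List.range' ch.length (ch.length + 1 - ch.length)).map
      (fun x => pvRowFun ch ca dp0 x) = [List.replicate (ca.length + 1) 0] := by
    rw [show ch.length + 1 - ch.length = 1 by omega]
    simp [List.range'_one, pvRowFun_top]
  rw [hinit1, pvRowFun_top] at h
  dsimp only
  rw [h]
  have hiN : i = ((i.toNat : Nat) : Int) := (Int.toNat_of_nonneg hi).symm
  have hjN : j = ((j.toNat : Nat) : Int) := (Int.toNat_of_nonneg hj).symm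
  rw [hiN, hjN, pvGetRow_nat,
      List.getElem?_map, List.getElem?_range (show i.toNat < ch.length + 1 by omega)]
  simp only [Option.map_some, Option.getD_some, Int.toNat_natCast]
  unfold pvRowFun
  rw [pvGetI_nat, List.getElem?_map, List.getElem?_range (show j.toNat < ca.length + 1 by omega)]
  simp only [Option.map_some, Option.getD_some]

-- ===== VERDICT (by name: the statement is the Claim_ definition above) =====
theorem valentineMagic_spec : Claim_equal_valentineMagic := by
  intro ch ca dp i j _hdom hpre
  unfold Spec_valentineMagic valentineMagic
  rcases hpre with h1 | ⟨h1, h2⟩ | ⟨hi, hi2, hj, hj2, htri⟩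
  · simp only [vmAux, valentineMagic_alt, if_pos h1]
  · simp only [vmAux, valentineMagic_alt, if_neg h1, if_pos h2]
  · have halt := alt_eq_pv ch ca dp i j hi hi2 hj hj2
    have hcong := pvVal_eq_pvValB ch ca dp (ca.length - j.toNat) i.toNat j.toNat le_rfl
      (by omega) (by intro x hx hix; exact htri x hx hix)
    rw [halt, ← hcong]
    have hiN : i = ((i.toNat : Nat) : Int) := (Int.toNat_of_nonneg hi).symm
    have hjN : j = ((j.toNat : Nat) : Int) := (Int.toNat_of_nonneg hj).symm
    rw [hiN, hjN]
    exact (vmAux_pv ch ca dp (ca.length + 1) dp i.toNat j.toNat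
        (fun x y _ _ => Or.inl rfl) (by omega) (by omega) (by omega)).1
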